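-- pv_equiv track=rewrite | github.com/AfshinMoussavi/Algorithm-Solutions | Quera/Python/175884/source.py | calculate_floor
-- ===== SOURCE A (Python) =====
-- def calculate_floor(string:str):
--     result = 0
--     for char in string:
--         if char == 'D':
--             result -= 1
--         else:
--             result += 1
--     return result
-- ===== SOURCE B (Python) =====
-- def calculate_floor(string: str):
--     return len(string) - 2 * string.count('D')
-- ===== Notes on version B (the rewrite author's own statement) =====
-- stated objective: simpler
-- what changed: Replaces the per-character accumulation loop and its if/else branch with one closed-form arithmetic expression over the length and the count of down-moves, valid because every non-down character contributes +1.
import Mathlib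
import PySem

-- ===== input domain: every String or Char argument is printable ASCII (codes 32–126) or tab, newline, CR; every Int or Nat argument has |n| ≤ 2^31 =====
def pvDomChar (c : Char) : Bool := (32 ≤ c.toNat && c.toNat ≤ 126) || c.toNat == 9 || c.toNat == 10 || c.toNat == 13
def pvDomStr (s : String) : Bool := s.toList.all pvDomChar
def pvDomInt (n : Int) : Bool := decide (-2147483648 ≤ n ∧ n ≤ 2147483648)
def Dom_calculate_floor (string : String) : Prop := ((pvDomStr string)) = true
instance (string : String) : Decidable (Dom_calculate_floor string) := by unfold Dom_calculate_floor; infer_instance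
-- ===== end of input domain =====

-- B replaces A's per-character accumulation loop with the closed form len(s) - 2*count('D') (objective: simpler).

-- ===== PORT A =====
def calculate_floor (string : String) : Int :=
  string.toList.foldl (fun result char => if char == 'D' then result - 1 else result + 1) 0

-- ===== PORT B =====
def calculate_floor_alt (string : String) : Int :=
  (PySem.Str.len string : Int) - 2 * (PySem.Str.count string "D" : Int)

-- ===== PRECONDITION & SPEC =====
def Spec_calculate_floor (string : String) (out : Int) : Prop := out = calculate_floor_alt string
instance (string : String) (out : Int) : Decidable (Spec_calculate_floor string out) := by unfold Spec_calculate_floor; infer_instance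

-- ===== CLAIM (what is proved, stated in full; the proofs are below) =====
def Claim_equal_calculate_floor : Prop := ∀ (string : String), Dom_calculate_floor string → Spec_calculate_floor string (calculate_floor string)

-- ===== LEMMAS AND PROOFS =====

theorem go_count_singleton (c : Char) (fuel : Nat) (l : List Char) (acc : Nat)
    (h : l.length ≤ fuel) :
    PySem.Chars.count.go [c] fuel l acc = acc + l.count c := by
  induction fuel generalizing l acc with
  | zero => cases l with
    | nil => simp [PySem.Chars.count.go]
    | cons a t => simp at h
  | succ n ih =>
    cases l with
    | nil => simp [PySem.Chars.count.go]
    | cons a t =>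
      rw [PySem.Chars.count.go]
      by_cases hc : a = c
      · simp [hc, List.isPrefixOf, ih t (acc + 1) (by simpa using h)]
        omega
      · have hpre : [c].isPrefixOf (a :: t) = false := by
          simp [List.isPrefixOf]; exact fun hh => hc hh.symm
        simp [hpre, hc, ih t acc (by simpa using Nat.le_of_succ_le_succ h)]

theorem count_singleton (c : Char) (l : List Char) :
    PySem.Chars.count l [c] = l.count c := by
  simp [PySem.Chars.count, go_count_singleton c l.length l 0 le_rfl]

theorem calc_floor_foldl (l : List Char) (a : Int) :
    l.foldl (fun result char => if char == 'D' then result - 1 else result + 1) a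
      = a + l.length - 2 * (l.count 'D' : Int) := by
  induction l generalizing a with
  | nil => simp
  | cons c cs ih =>
    simp only [List.foldl_cons, ih, List.length_cons, List.count_cons]
    by_cases h : c = 'D' <;> simp [h] <;> ring

-- ===== VERDICT (by name: the statement is the Claim_ definition above) =====
theorem calculate_floor_spec : Claim_equal_calculate_floor := by
  intro s _
  unfold Spec_calculate_floor calculate_floor calculate_floor_alt
  rw [calc_floor_foldl]
  simp only [PySem.Str.count, PySem.Str.len_eq]
  have : "D".toList = ['D'] := rfl
  rw [this, count_singleton]
  ring
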